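-- pv_equiv track=rewrite | github.com/JFan5/Safety-gen | grippers/convert_pddl3.py | simult_rooms_along_plan
-- ===== SOURCE A (Python) =====
-- from typing import Dict, List, Tuple, Optional, Set
--
-- def simult_rooms_along_plan(at_robby_init: Dict[str, str],
--                             robots_ordered: List[str],
--                             actions: List[Tuple[str, List[str]]]) -> Set[str]:
--     """
--     顺序回放 plan，仅用 move 更新位置。
--     返回出现过“两机器人同时在同一房间”的房间集合（不依赖固定房间名）。
--     """
--     rooms_simult: Set[str] = set()
--     if len(robots_ordered) < 2:
--         return rooms_simult
--     r1, r2 = robots_ordered[:2]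
--     pos = dict(at_robby_init)  # robot -> room
--
--     def check_and_record():
--         if pos.get(r1) and pos.get(r1) == pos.get(r2):
--             rooms_simult.add(pos[r1])
--
--     # 初始检查
--     check_and_record()
--
--     # 回放
--     for name, args in actions:
--         if name == "move" and len(args) >= 3:
--             rob, _from, _to = args[0], args[1], args[2]
--             if rob in (r1, r2):
--                 pos[rob] = _to
--         # 每步后检查
--         check_and_record()
--     return rooms_simult
-- ===== SOURCE B (Python) =====
-- def simult_rooms_along_plan(at_robby_init, robots_ordered, actions):
--     # Interval algorithm: compress each robot's trajectory into room segments
--     # (start_time, room), each lasting until the next segment's start (or T),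
--     # then sweep the two segmentations with a two-pointer interval
--     # intersection instead of re-checking the robot pair at every time step.
--     if len(robots_ordered) < 2:
--         return set()
--     r1, r2 = robots_ordered[0], robots_ordered[1]
--     init = dict(at_robby_init)
--     T = len(actions) + 1  # check times are 0 .. len(actions)
--
--     def segments(r):
--         segs = [(0, init.get(r, ""))]
--         t = 1
--         for name, args in actions:
--             if name == "move" and len(args) >= 3 and args[0] == r:
--                 segs.append((t, args[2]))
--             t += 1
--         return segs
--
--     s1, s2 = segments(r1), segments(r2)
--     res = set()
--     i = j = 0
--     while i < len(s1) and j < len(s2):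
--         e1 = s1[i + 1][0] if i + 1 < len(s1) else T
--         e2 = s2[j + 1][0] if j + 1 < len(s2) else T
--         a, b = s1[i][1], s2[j][1]
--         if a and a == b:
--             res.add(a)
--         if e1 <= e2:
--             i += 1
--         if e2 <= e1:
--             j += 1
--     return res
-- ===== Notes on version B (the rewrite author's own statement) =====
-- stated objective: alternative
-- what changed: B replaces A's step-by-step replay with a check after every step by an interval algorithm: it compresses each of the two robots' trajectories into (start_time, room) segments and then intersects the two segmentations with a two-pointer sweep, collecting a room once per overlapping segment pair instead of once per time step.
import Mathlib
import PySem

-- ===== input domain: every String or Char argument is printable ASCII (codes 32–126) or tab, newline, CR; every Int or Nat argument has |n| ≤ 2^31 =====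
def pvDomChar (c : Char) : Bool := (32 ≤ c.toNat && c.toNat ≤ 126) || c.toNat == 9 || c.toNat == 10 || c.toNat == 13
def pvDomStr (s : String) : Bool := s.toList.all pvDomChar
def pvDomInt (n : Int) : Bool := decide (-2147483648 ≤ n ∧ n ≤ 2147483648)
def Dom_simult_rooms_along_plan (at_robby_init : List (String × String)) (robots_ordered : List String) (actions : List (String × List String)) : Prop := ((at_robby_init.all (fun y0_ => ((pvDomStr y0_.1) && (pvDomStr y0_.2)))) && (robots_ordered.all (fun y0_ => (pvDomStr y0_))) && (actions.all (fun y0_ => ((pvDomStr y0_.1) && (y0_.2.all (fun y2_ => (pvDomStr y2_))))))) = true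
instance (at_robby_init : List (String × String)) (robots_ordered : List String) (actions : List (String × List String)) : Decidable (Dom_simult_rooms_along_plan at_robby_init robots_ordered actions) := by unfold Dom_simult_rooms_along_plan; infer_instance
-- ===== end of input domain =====

-- B replaces A's step-by-step replay with check after every step by an interval algorithm:
-- compress each of the two robots' trajectories into room segments, then intersect the two
-- segmentations with a two-pointer sweep (objective: alternative algorithm, same cost).

-- ===== PORT A =====
-- check_and_record: add pos[r1] when pos.get(r1) is truthy and equals pos.get(r2)
def pvCheckA (r1 r2 : String) (pos : PySem.Dict String String) (s : PySem.Set String) : PySem.Set String :=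
  match pos.get? r1 with
  | some v => if v ≠ "" ∧ pos.get? r2 = some v then PySem.Set.add s v else s
  | none => s

-- the replay loop: update pos on a "move" with len(args) >= 3 of r1/r2, then check after each action
def pvLoopA (r1 r2 : String) : List (String × List String) → PySem.Dict String String → PySem.Set String → PySem.Set String
  | [], _, s => s
  | (name, args) :: rest, pos, s =>
    let pos' :=
      if name = "move" then
        match args with
        | rob :: _ :: dest :: _ => if rob = r1 ∨ rob = r2 then pos.insert rob dest else pos
        | _ => pos
      else pos
    pvLoopA r1 r2 rest pos' (pvCheckA r1 r2 pos' s)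

def simult_rooms_along_plan (at_robby_init : List (String × String)) (robots_ordered : List String) (actions : List (String × List String)) : List String :=
  match robots_ordered with
  | r1 :: r2 :: _ =>
    let pos := PySem.Dict.ofList at_robby_init
    pvLoopA r1 r2 actions pos (pvCheckA r1 r2 pos PySem.Set.empty)
  | _ => []

-- ===== PORT B =====
-- end of the current segment: start of the next segment, or T (s[i+1][0] if i+1 < len(s) else T)
def pvE (T : Nat) : List (Nat × String) → Nat
  | [] => T
  | (x, _) :: _ => x

-- segments(r) loop: append (t, dest) for every move of r, t counting from 1
def pvSegsLoop (r : String) : Nat → List (String × List String) → List (Nat × String) → List (Nat × String)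
  | _, [], segs => segs
  | t, (name, args) :: rest, segs =>
    pvSegsLoop r (t + 1) rest
      (if name = "move" then
        match args with
        | rob :: _ :: dest :: _ => if rob = r then segs ++ [(t, dest)] else segs
        | _ => segs
       else segs)

-- the two-pointer sweep over the two segment lists (index advance ported as suffix advance)
def pvIntersect (T : Nat) : List (Nat × String) → List (Nat × String) → PySem.Set String → PySem.Set String
  | [], _, acc => acc
  | _ :: _, [], acc => acc
  | (a, v) :: s1t, (b, w) :: s2t, acc =>
    pvIntersect T (if pvE T s1t ≤ pvE T s2t then s1t else (a, v) :: s1t)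
                  (if pvE T s2t ≤ pvE T s1t then s2t else (b, w) :: s2t)
                  (if v ≠ "" ∧ v = w then PySem.Set.add acc v else acc)
  termination_by s1 s2 _ => s1.length + s2.length
  decreasing_by split <;> split <;> simp_all <;> omega

def simult_rooms_along_plan_alt (at_robby_init : List (String × String)) (robots_ordered : List String) (actions : List (String × List String)) : List String :=
  match robots_ordered with
  | r1 :: r2 :: _ =>
    let init := PySem.Dict.ofList at_robby_init
    let T := actions.length + 1
    pvIntersect T (pvSegsLoop r1 1 actions [(0, init.getD r1 "")])
                  (pvSegsLoop r2 1 actions [(0, init.getD r2 "")]) PySem.Set.empty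
  | _ => []

-- ===== PRECONDITION & SPEC =====
def Spec_simult_rooms_along_plan (at_robby_init : List (String × String)) (robots_ordered : List String) (actions : List (String × List String)) (out : List String) : Prop := out = simult_rooms_along_plan_alt at_robby_init robots_ordered actions
instance (at_robby_init : List (String × String)) (robots_ordered : List String) (actions : List (String × List String)) (out : List String) : Decidable (Spec_simult_rooms_along_plan at_robby_init robots_ordered actions out) := by unfold Spec_simult_rooms_along_plan; infer_instance

-- ===== CLAIM (what is proved, stated in full; the proofs are below) =====
def Claim_equal_simult_rooms_along_plan : Prop := ∀ (at_robby_init : List (String × String)) (robots_ordered : List String) (actions : List (String × List String)), Dom_simult_rooms_along_plan at_robby_init robots_ordered actions → Spec_simult_rooms_along_plan at_robby_init robots_ordered actions (simult_rooms_along_plan at_robby_init robots_ordered actions)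

-- ===== LEMMAS AND PROOFS =====

-- the elementwise "both in the same non-empty room" set step
def pvG (s : PySem.Set String) (p : String × String) : PySem.Set String :=
  if p.1 ≠ "" ∧ p.1 = p.2 then PySem.Set.add s p.1 else s

-- room of robot r after one action, as a scalar update
def pvUpd (r room : String) (act : String × List String) : String :=
  if act.1 = "move" then
    match act.2 with
    | rob :: _ :: dest :: _ => if rob = r then dest else room
    | _ => room
  else room

-- room timeline of robot r after each action (times 1 .. len(actions))
def pvTLt (r room : String) : List (String × List String) → List String
  | [] => []
  | act :: rest => pvUpd r room act :: pvTLt r (pvUpd r room act) rest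

-- the (t, dest) pairs of the moves of r, t counting from t0
def segsTail (r : String) : Nat → List (String × List String) → List (Nat × String)
  | _, [] => []
  | t, (name, args) :: rest =>
    (if name = "move" then
       match args with
       | rob :: _ :: dest :: _ => if rob = r then [(t, dest)] else []
       | _ => []
     else []) ++ segsTail r (t + 1) rest

-- decompress a segment list into the per-time room list, from time t on
def pvExpand (T : Nat) : Nat → List (Nat × String) → List String
  | _, [] => []
  | t, (_, v) :: rest => List.replicate (pvE T rest - t) v ++ pvExpand T (pvE T rest) rest

-- well-formed segment list: starts strictly increasing, all < T
def segsOK (T : Nat) : List (Nat × String) → Prop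
  | [] => True
  | (a, _) :: rest => a < pvE T rest ∧ segsOK T rest

theorem pvCheckA_eq_g (r1 r2 : String) (pos : PySem.Dict String String) (s : PySem.Set String) :
    pvCheckA r1 r2 pos s = pvG s (pos.getD r1 "", pos.getD r2 "") := by
  unfold pvG
  rw [PySem.Dict.getD_eq_get?_getD, PySem.Dict.getD_eq_get?_getD]
  cases h1 : pos.get? r1 with
  | none => simp [pvCheckA, h1]
  | some v =>
    cases h2 : pos.get? r2 with
    | none =>
      simp only [pvCheckA, h1, h2, Option.getD_some, Option.getD_none]
      split_ifs with hA hB <;> tauto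
    | some w =>
      simp only [pvCheckA, h1, h2, Option.getD_some]
      split_ifs with hA hB <;> simp_all

-- the dict update in A's loop, seen from robot r ∈ {r1, r2}
theorem pvUpdA (r1 r2 : String) (pos : PySem.Dict String String) (name : String) (args : List String)
    (r : String) (hr : r = r1 ∨ r = r2) :
    (if name = "move" then
        match args with
        | rob :: _ :: dest :: _ => if rob = r1 ∨ rob = r2 then pos.insert rob dest else pos
        | _ => pos
      else pos).getD r "" = pvUpd r (pos.getD r "") (name, args) := by
  unfold pvUpd
  by_cases hm : name = "move"
  · simp only [hm, if_pos]
    match args with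
    | [] => rfl
    | [x] => rfl
    | [x, y] => rfl
    | rob :: x :: dest :: restargs =>
      show (if rob = r1 ∨ rob = r2 then pos.insert rob dest else pos).getD r "" =
        (if rob = r then dest else pos.getD r "")
      by_cases hrob : rob = r1 ∨ rob = r2
      · rw [if_pos hrob, PySem.Dict.getD_insert]
        by_cases he : r = rob
        · simp [he]
        · rw [if_neg he, if_neg (fun h => he h.symm)]
      · have hne : rob ≠ r := fun h => hrob (h ▸ hr)
        rw [if_neg hrob, if_neg hne]
  · simp [hm]

-- A's replay loop equals folding the elementwise check over the two zipped timelines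
theorem pvLoopA_eq (r1 r2 : String) (acts : List (String × List String)) :
    ∀ (pos : PySem.Dict String String) (s : PySem.Set String),
      pvLoopA r1 r2 acts pos s =
        List.foldl pvG s ((pvTLt r1 (pos.getD r1 "") acts).zip (pvTLt r2 (pos.getD r2 "") acts)) := by
  induction acts with
  | nil => intro pos s; rfl
  | cons a rest ih =>
    intro pos s
    obtain ⟨name, args⟩ := a
    show pvLoopA r1 r2 rest _ _ = _
    rw [ih, pvCheckA_eq_g]
    rw [pvUpdA r1 r2 pos name args r1 (Or.inl rfl), pvUpdA r1 r2 pos name args r2 (Or.inr rfl)]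
    rfl

-- one-step equations, to rewrite a single occurrence at a time
theorem segsTail_cons (r : String) (t : Nat) (name : String) (args : List String)
    (rest : List (String × List String)) :
    segsTail r t ((name, args) :: rest) =
      (if name = "move" then
         match args with
         | rob :: _ :: dest :: _ => if rob = r then [(t, dest)] else []
         | _ => []
       else []) ++ segsTail r (t + 1) rest := rfl

theorem segsOK_cons (T a : Nat) (v : String) (rest : List (Nat × String)) :
    segsOK T ((a, v) :: rest) = (a < pvE T rest ∧ segsOK T rest) := rfl

-- the segments loop appends segsTail to its accumulator
theorem pvSegsLoop_eq (r : String) (acts : List (String × List String)) :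
    ∀ (t : Nat) (segs : List (Nat × String)),
      pvSegsLoop r t acts segs = segs ++ segsTail r t acts := by
  induction acts with
  | nil => intro t segs; simp [pvSegsLoop, segsTail]
  | cons a rest ih =>
    intro t segs
    obtain ⟨name, args⟩ := a
    show pvSegsLoop r (t + 1) rest _ = _
    rw [ih, segsTail_cons]
    by_cases hm : name = "move"
    · match args with
      | [] => simp [hm]
      | [x] => simp [hm]
      | [x, y] => simp [hm]
      | rob :: x :: dest :: restargs =>
        by_cases hr : rob = r <;> simp [hm, hr]
    · simp [hm]

-- every start in segsTail r t acts is ≥ t (as seen through pvE)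
theorem pvE_segsTail_ge (r : String) (acts : List (String × List String)) :
    ∀ (t T : Nat), t + acts.length ≤ T → t ≤ pvE T (segsTail r t acts) := by
  induction acts with
  | nil => intro t T h; simp only [segsTail, pvE]; omega
  | cons a rest ih =>
    intro t T h
    obtain ⟨name, args⟩ := a
    rw [segsTail_cons]
    have hrest : t + 1 ≤ pvE T (segsTail r (t + 1) rest) := by
      apply ih; simp at h ⊢; omega
    by_cases hm : name = "move"
    · match args with
      | [] => simp only [hm, if_true]; simp only [List.nil_append]; omega
      | [x] => simp only [hm, if_true]; simp only [List.nil_append]; omega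
      | [x, y] => simp only [hm, if_true]; simp only [List.nil_append]; omega
      | rob :: x :: dest :: restargs =>
        by_cases hr : rob = r
        · simp [hm, hr, pvE]
        · simp only [hm, hr, if_true, if_false, List.nil_append]; omega
    · simp only [hm, if_false, List.nil_append]; omega

theorem segsOK_segsTail (r : String) (acts : List (String × List String)) :
    ∀ (t T : Nat), t + acts.length ≤ T → segsOK T (segsTail r t acts) := by
  induction acts with
  | nil => intro t T h; simp [segsTail, segsOK]
  | cons a rest ih =>
    intro t T h
    obtain ⟨name, args⟩ := a
    rw [segsTail_cons]
    have hrest : segsOK T (segsTail r (t + 1) rest) := by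
      apply ih; simp at h ⊢; omega
    have hge : t + 1 ≤ pvE T (segsTail r (t + 1) rest) := by
      apply pvE_segsTail_ge; simp at h ⊢; omega
    by_cases hm : name = "move"
    · match args with
      | [] => simpa [hm] using hrest
      | [x] => simpa [hm] using hrest
      | [x, y] => simpa [hm] using hrest
      | rob :: x :: dest :: restargs =>
        by_cases hr : rob = r
        · simp only [hm, hr, if_true, List.singleton_append, segsOK_cons]
          exact ⟨by omega, hrest⟩
        · simpa [hm, hr] using hrest
    · simpa [hm] using hrest

-- peel a single time step off the front of an expansion
theorem pvExpand_peel (T t j : Nat) (v : String) (rest : List (Nat × String))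
    (h : t < pvE T rest) :
    pvExpand T t ((j, v) :: rest) = v :: pvExpand T (t + 1) ((j, v) :: rest) := by
  show List.replicate (pvE T rest - t) v ++ _ = v :: (List.replicate (pvE T rest - (t + 1)) v ++ _)
  have : pvE T rest - t = (pvE T rest - (t + 1)) + 1 := by omega
  rw [this, List.replicate_succ, List.cons_append]

-- split an expansion at an intermediate time m inside the head segment
theorem pvExpand_split (T t m j : Nat) (v : String) (rest : List (Nat × String))
    (h1 : t ≤ m) (h2 : m ≤ pvE T rest) :
    pvExpand T t ((j, v) :: rest) =
      List.replicate (m - t) v ++ pvExpand T m ((j, v) :: rest) := by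
  show List.replicate (pvE T rest - t) v ++ _ =
    List.replicate (m - t) v ++ (List.replicate (pvE T rest - m) v ++ _)
  rw [← List.append_assoc, ← List.replicate_add]
  congr 2
  omega

-- expanding a segment list reproduces the timeline (head start is irrelevant)
theorem pvExpand_segsTail (r : String) (acts : List (String × List String)) :
    ∀ (k j : Nat) (room : String) (T : Nat), T = k + 1 + acts.length →
      pvExpand T k ((j, room) :: segsTail r (k + 1) acts) = room :: pvTLt r room acts := by
  induction acts with
  | nil =>
    intro k j room T hT
    have h1 : T - k = 1 := by simp at hT; omega
    show List.replicate (pvE T [] - k) room ++ pvExpand T (pvE T []) [] = _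
    simp [pvE, pvExpand, pvTLt, h1]
  | cons a rest ih =>
    intro k j room T hT
    obtain ⟨name, args⟩ := a
    have hTlen : T = (k + 1) + 1 + rest.length := by simp at hT; omega
    by_cases hmove : name = "move" ∧ ∃ rob x dest restargs, args = rob :: x :: dest :: restargs ∧ rob = r
    · obtain ⟨hm, rob, x, dest, restargs, hargs, hr⟩ := hmove
      have hseg : segsTail r (k + 1) ((name, args) :: rest) =
          (k + 1, dest) :: segsTail r (k + 2) rest := by
        rw [segsTail_cons]; simp [hm, hargs, hr]
      have hupd : pvUpd r room (name, args) = dest := by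
        unfold pvUpd; simp [hm, hargs, hr]
      rw [hseg]
      show List.replicate (pvE T ((k+1, dest) :: segsTail r (k+2) rest) - k) room ++
        pvExpand T (pvE T ((k+1, dest) :: segsTail r (k+2) rest)) ((k+1, dest) :: segsTail r (k+2) rest) = _
      have hpe : pvE T ((k+1, dest) :: segsTail r (k+2) rest) = k + 1 := rfl
      rw [hpe]
      have h1 : k + 1 - k = 1 := by omega
      have hih := ih (k + 1) (k + 1) dest T hTlen
      rw [h1, show k + 1 + 1 = k + 2 from rfl] at *
      rw [hih]
      show [room] ++ (dest :: pvTLt r dest rest) = _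
      simp only [List.singleton_append, pvTLt, hupd]
    · have hseg : segsTail r (k + 1) ((name, args) :: rest) = segsTail r (k + 2) rest := by
        rw [segsTail_cons]
        by_cases hm : name = "move"
        · match args with
          | [] => simp [hm]
          | [x] => simp [hm]
          | [x, y] => simp [hm]
          | rob :: x :: dest :: restargs =>
            have hr : rob ≠ r := fun h => hmove ⟨hm, rob, x, dest, restargs, rfl, h⟩
            simp [hm, hr]
        · simp [hm]
      have hupd : pvUpd r room (name, args) = room := by
        unfold pvUpd
        by_cases hm : name = "move"
        · match args with
          | [] => simp [hm]
          | [x] => simp [hm]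
          | [x, y] => simp [hm]
          | rob :: x :: dest :: restargs =>
            have hr : rob ≠ r := fun h => hmove ⟨hm, rob, x, dest, restargs, rfl, h⟩
            simp [hm, hr]
        · simp [hm]
      rw [hseg]
      have hpeel : k < pvE T (segsTail r (k + 2) rest) := by
        have := pvE_segsTail_ge r rest (k + 2) T (by omega)
        omega
      rw [pvExpand_peel T k j room _ hpeel]
      have hih := ih (k + 1) j room T hTlen
      rw [show k + 1 + 1 = k + 2 from rfl] at hih
      rw [hih]
      show room :: (room :: pvTLt r room rest) = _
      simp only [pvTLt, hupd]

-- pvG is idempotent on a repeated pair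
theorem pvG_idem (acc : PySem.Set String) (p : String × String) : pvG (pvG acc p) p = pvG acc p := by
  unfold pvG
  split_ifs with h
  · exact PySem.Set.add_of_mem (by rw [PySem.Set.mem_add]; right; rfl)
  · rfl

theorem foldl_pvG_replicate (k : Nat) (hk : 1 ≤ k) (acc : PySem.Set String) (p : String × String) :
    List.foldl pvG acc (List.replicate k p) = pvG acc p := by
  induction k generalizing acc with
  | zero => omega
  | succ n ih =>
    rw [List.replicate_succ, List.foldl_cons]
    rcases Nat.eq_zero_or_pos n with h0 | h1
    · simp [h0]
    · rw [ih h1, pvG_idem]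

theorem zip_replicate_same {α β : Type} (k : Nat) (v : α) (w : β) :
    (List.replicate k v).zip (List.replicate k w) = List.replicate k (v, w) := by
  induction k with
  | zero => rfl
  | succ n ih => simp [List.replicate_succ, ih]

-- the two-pointer sweep equals folding the elementwise check over the zipped expansions
theorem pvIntersect_eq (T : Nat) (n : Nat) :
    ∀ (s1 s2 : List (Nat × String)), s1.length + s2.length ≤ n →
    ∀ (acc : PySem.Set String) (t : Nat), segsOK T s1 → segsOK T s2 →
      (∀ p r1t, s1 = p :: r1t → t < pvE T r1t) →
      (∀ p r2t, s2 = p :: r2t → t < pvE T r2t) →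
      pvIntersect T s1 s2 acc =
        List.foldl pvG acc ((pvExpand T t s1).zip (pvExpand T t s2)) := by
  induction n with
  | zero =>
    intro s1 s2 hn
    match s1, s2 with
    | [], _ => intro acc t _ _ _ _; simp [pvIntersect, pvExpand]
    | _ :: _, _ => simp at hn
  | succ n ih =>
    intro s1 s2 hn acc t hok1 hok2 hin1 hin2
    match s1, s2 with
    | [], s2 => simp [pvIntersect, pvExpand]
    | (a, v) :: s1t, [] =>
      rw [pvIntersect]
      simp [pvExpand]
    | (a, v) :: s1t, (b, w) :: s2t =>
      have ht1 : t < pvE T s1t := hin1 _ _ rfl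
      have ht2 : t < pvE T s2t := hin2 _ _ rfl
      -- split both expansions at m := min of the two segment ends, collapse the common block
      have hx1 : pvExpand T t ((a, v) :: s1t) =
          List.replicate (min (pvE T s1t) (pvE T s2t) - t) v ++
            pvExpand T (min (pvE T s1t) (pvE T s2t)) ((a, v) :: s1t) :=
        pvExpand_split T t _ a v s1t (by omega) (by omega)
      have hx2 : pvExpand T t ((b, w) :: s2t) =
          List.replicate (min (pvE T s1t) (pvE T s2t) - t) w ++
            pvExpand T (min (pvE T s1t) (pvE T s2t)) ((b, w) :: s2t) :=
        pvExpand_split T t _ b w s2t (by omega) (by omega)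
      rw [hx1, hx2, List.zip_append (by simp), zip_replicate_same, List.foldl_append,
        foldl_pvG_replicate _ (by omega) acc (v, w), pvIntersect]
      have hacc : (if v ≠ "" ∧ v = w then PySem.Set.add acc v else acc) = pvG acc (v, w) := rfl
      rw [hacc]
      -- the remaining expansion agrees with the sweep's updated lists
      have hdrop1 : pvExpand T (min (pvE T s1t) (pvE T s2t)) ((a, v) :: s1t) =
          pvExpand T (min (pvE T s1t) (pvE T s2t))
            (if pvE T s1t ≤ pvE T s2t then s1t else (a, v) :: s1t) := by
        by_cases h : pvE T s1t ≤ pvE T s2t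
        · rw [if_pos h, Nat.min_eq_left h]
          show List.replicate (pvE T s1t - pvE T s1t) v ++ pvExpand T (pvE T s1t) s1t = _
          simp
        · rw [if_neg h]
      have hdrop2 : pvExpand T (min (pvE T s1t) (pvE T s2t)) ((b, w) :: s2t) =
          pvExpand T (min (pvE T s1t) (pvE T s2t))
            (if pvE T s2t ≤ pvE T s1t then s2t else (b, w) :: s2t) := by
        by_cases h : pvE T s2t ≤ pvE T s1t
        · rw [if_pos h, Nat.min_eq_right h]
          show List.replicate (pvE T s2t - pvE T s2t) w ++ pvExpand T (pvE T s2t) s2t = _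
          simp
        · rw [if_neg h]
      rw [hdrop1, hdrop2]
      refine ih _ _ ?_ (pvG acc (v, w)) (min (pvE T s1t) (pvE T s2t)) ?_ ?_ ?_ ?_
      · -- length decreases
        by_cases h12 : pvE T s1t ≤ pvE T s2t <;> by_cases h21 : pvE T s2t ≤ pvE T s1t <;>
          simp only [h12, h21, if_true, if_false] <;> simp at hn ⊢ <;> omega
      · by_cases h : pvE T s1t ≤ pvE T s2t
        · rw [if_pos h]; exact ((segsOK_cons T a v s1t) ▸ hok1).2
        · rw [if_neg h]; exact hok1
      · by_cases h : pvE T s2t ≤ pvE T s1t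
        · rw [if_pos h]; exact ((segsOK_cons T b w s2t) ▸ hok2).2
        · rw [if_neg h]; exact hok2
      · intro p r1t' heq
        by_cases h : pvE T s1t ≤ pvE T s2t
        · rw [if_pos h] at heq
          rcases p with ⟨p1, p2⟩
          have hok1t : segsOK T s1t := ((segsOK_cons T a v s1t) ▸ hok1).2
          rw [heq] at hok1t
          have hlt : p1 < pvE T r1t' := ((segsOK_cons T p1 p2 r1t') ▸ hok1t).1
          have hep : pvE T s1t = p1 := by rw [heq]; rfl
          omega
        · rw [if_neg h] at heq
          have he : r1t' = s1t := by injection heq with _ h2; exact h2.symm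
          subst he
          omega
      · intro p r2t' heq
        by_cases h : pvE T s2t ≤ pvE T s1t
        · rw [if_pos h] at heq
          rcases p with ⟨p1, p2⟩
          have hok2t : segsOK T s2t := ((segsOK_cons T b w s2t) ▸ hok2).2
          rw [heq] at hok2t
          have hlt : p1 < pvE T r2t' := ((segsOK_cons T p1 p2 r2t') ▸ hok2t).1
          have hep : pvE T s2t = p1 := by rw [heq]; rfl
          omega
        · rw [if_neg h] at heq
          have he : r2t' = s2t := by injection heq with _ h2; exact h2.symm
          subst he
          omega

-- ===== VERDICT (by name: the statement is the Claim_ definition above) =====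
theorem simult_rooms_along_plan_spec : Claim_equal_simult_rooms_along_plan := by
  intro init robots actions _
  show simult_rooms_along_plan init robots actions = simult_rooms_along_plan_alt init robots actions
  rcases robots with _ | ⟨r1, _ | ⟨r2, tail⟩⟩
  · rfl
  · rfl
  · set pos0 := PySem.Dict.ofList init with hpos0
    set T := actions.length + 1 with hT
    show pvLoopA r1 r2 actions pos0 (pvCheckA r1 r2 pos0 PySem.Set.empty) =
      pvIntersect T (pvSegsLoop r1 1 actions [(0, pos0.getD r1 "")])
        (pvSegsLoop r2 1 actions [(0, pos0.getD r2 "")]) PySem.Set.empty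
    rw [pvSegsLoop_eq, pvSegsLoop_eq, List.singleton_append, List.singleton_append]
    rw [pvIntersect_eq T (((0, pos0.getD r1 "") :: segsTail r1 1 actions).length +
        ((0, pos0.getD r2 "") :: segsTail r2 1 actions).length) _ _ le_rfl PySem.Set.empty 0
      (((segsOK_cons T 0 (pos0.getD r1 "") (segsTail r1 1 actions)).symm ▸
        ⟨by have := pvE_segsTail_ge r1 actions 1 T (by omega); omega,
          segsOK_segsTail r1 actions 1 T (by omega)⟩))
      (((segsOK_cons T 0 (pos0.getD r2 "") (segsTail r2 1 actions)).symm ▸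
        ⟨by have := pvE_segsTail_ge r2 actions 1 T (by omega); omega,
          segsOK_segsTail r2 actions 1 T (by omega)⟩))
      (by intro p r1t heq
          have : r1t = segsTail r1 1 actions := by injection heq with _ h2; exact h2.symm
          subst this
          have := pvE_segsTail_ge r1 actions 1 T (by omega); omega)
      (by intro p r2t heq
          have : r2t = segsTail r2 1 actions := by injection heq with _ h2; exact h2.symm
          subst this
          have := pvE_segsTail_ge r2 actions 1 T (by omega); omega)]
    rw [pvExpand_segsTail r1 actions 0 0 (pos0.getD r1 "") T (by omega),
      pvExpand_segsTail r2 actions 0 0 (pos0.getD r2 "") T (by omega)]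
    rw [pvLoopA_eq, pvCheckA_eq_g]
    rfl
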